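-- pv_equiv track=rewrite | github.com/astrodyl/google-foobar | runningWithBunnies.py | solution
-- ===== SOURCE A (Python) =====
-- from itertools import permutations
--
-- def negativeCycle(times):
--     V = len(times)
--
--     for k in range(V):
--         for i in range(V):
--             for j in range(V):
--                 if times[i][j] > times[i][k] + times[k][j]:
--                     times[i][j] = times[i][k] + times[k][j]
--
--     for i in range(V):
--         if times[i][i] < 0:
--             return True
--
--     return False
--
-- def findPath(s, l):
--     return s + [i for i in l] + [-1]
--
-- def addTime(t, p):
--     k, tt = 0, 0
--     while k < len(p)-1:
--         tt += t[p[k]][p[k+1]]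
--         k+=1
--     return tt
--
-- def solution(time, time_limit):
--     num_of_ids = len(time) - 2
--
--     if num_of_ids == 0:
--         return []
--
--     if negativeCycle(time):
--         return [i for i in range(num_of_ids)]
--
--     for i in range(num_of_ids + 1, 0, -1):
--         # itertools does all of the heavy lifting
--         for perm in permutations(range(1, num_of_ids + 1), i):
--             path = findPath([0], perm)
--
--             total_time = addTime(time, path)
--             if total_time <= time_limit:
--                 saved_bunnies = list(i - 1 for i in perm)
--                 saved_bunnies.sort()
--                 return saved_bunnies
--     return []
-- ===== SOURCE B (Python) =====
-- # B: same Floyd-Warshall closure (mutates `time` in place like A in the main case),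
-- # but the factorial search is a recursive backtracking DFS that builds each
-- # permutation in lexicographic order while accumulating the path time
-- # incrementally, instead of materializing every itertools permutation and
-- # re-summing its whole path.
-- def solution(time, time_limit):
--     n = len(time) - 2
--     if n <= 0:
--         return []
--
--     V = len(time)
--     for k in range(V):
--         for i in range(V):
--             for j in range(V):
--                 t = time[i][k] + time[k][j]
--                 if t < time[i][j]:
--                     time[i][j] = t
--
--     if any(time[i][i] < 0 for i in range(V)):
--         return list(range(n))
--
--     def dfs(cur, elapsed, remaining, need):
--         if need == 0:
--             # finish at the bulkhead (last column)
--             if elapsed + time[cur][-1] <= time_limit: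
--                 return []
--             return None
--         for idx in range(len(remaining)):
--             nxt = remaining[idx]
--             res = dfs(nxt, elapsed + time[cur][nxt],
--                       remaining[:idx] + remaining[idx + 1:], need - 1)
--             if res is not None:
--                 return [nxt] + res
--         return None
--
--     for size in range(n, 0, -1):
--         res = dfs(0, 0, list(range(1, n + 1)), size)
--         if res is not None:
--             return sorted(x - 1 for x in res)
--     return []
-- ===== Notes on version B (the rewrite author's own statement) =====
-- stated objective: alternative
-- what changed: The itertools-permutations search (which materializes every r-permutation and re-sums its whole path per candidate) is replaced by a recursive backtracking DFS that generates permutations in the same lexicographic order while accumulating the elapsed path time incrementally; the Floyd-Warshall closure and its negative-diagonal check are kept.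
import Mathlib
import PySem

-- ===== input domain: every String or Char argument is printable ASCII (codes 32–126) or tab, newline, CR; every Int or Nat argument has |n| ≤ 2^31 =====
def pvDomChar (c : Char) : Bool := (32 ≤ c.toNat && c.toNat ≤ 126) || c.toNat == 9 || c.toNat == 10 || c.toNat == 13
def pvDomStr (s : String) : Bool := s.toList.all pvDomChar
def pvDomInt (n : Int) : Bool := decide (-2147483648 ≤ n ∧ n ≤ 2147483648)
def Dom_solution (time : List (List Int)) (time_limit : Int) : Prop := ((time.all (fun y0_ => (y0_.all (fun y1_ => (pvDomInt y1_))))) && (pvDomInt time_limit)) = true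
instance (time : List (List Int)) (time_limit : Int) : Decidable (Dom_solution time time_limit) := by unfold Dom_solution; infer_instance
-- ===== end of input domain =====

-- B replaces the itertools-permutations search (which re-sums each whole path) by a
-- recursive backtracking DFS that builds permutations in the same lexicographic order
-- while accumulating the path time incrementally; the Floyd–Warshall closure is kept.
-- Both Pythons mutate `time` in place (the FW closure); the equivalence proved here is
-- about the RETURN value only.

-- ===== PORT A =====
-- Python's negativeCycle mutates `times` in place; the port returns the mutated
-- matrix together with the Bool it returns.
def negativeCycle (times : List (List Int)) : List (List Int) × Bool :=
  let V : Int := times.length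
  let t :=
    (PySem.List.pyRange 0 V 1).foldl (fun t k =>
      (PySem.List.pyRange 0 V 1).foldl (fun t i =>
        (PySem.List.pyRange 0 V 1).foldl (fun t j =>
          if PySem.List.pyGetD (PySem.List.pyGetD t i []) j 0 >
             PySem.List.pyGetD (PySem.List.pyGetD t i []) k 0 +
               PySem.List.pyGetD (PySem.List.pyGetD t k []) j 0 then
            PySem.List.pySetD t i
              (PySem.List.pySetD (PySem.List.pyGetD t i []) j
                (PySem.List.pyGetD (PySem.List.pyGetD t i []) k 0 +
                  PySem.List.pyGetD (PySem.List.pyGetD t k []) j 0))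
          else t) t) t) times
  (t, (PySem.List.pyRange 0 V 1).any (fun i =>
        decide (PySem.List.pyGetD (PySem.List.pyGetD t i []) i 0 < 0)))

def findPath (s : List Int) (l : List Int) : List Int :=
  s ++ l.map (fun i => i) ++ [-1]

-- while k < len(p)-1: tt += t[p[k]][p[k+1]]; k += 1
def addTimeGo (t : List (List Int)) (p : List Int) (k : Nat) (tt : Int) : Int :=
  if h : k < p.length - 1 then
    addTimeGo t p (k + 1)
      (tt + PySem.List.pyGetD
              (PySem.List.pyGetD t (PySem.List.pyGetD p (k : Int) 0) [])
              (PySem.List.pyGetD p ((k : Int) + 1) 0) 0)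
  else tt
termination_by p.length - k

def addTime (t : List (List Int)) (p : List Int) : Int := addTimeGo t p 0 0

-- the inner 'for perm in permutations(...)' loop with its early return
def tryPermsA (t : List (List Int)) (limit : Int) : List (List Int) → Option (List Int)
  | [] => none
  | perm :: rest =>
    let path := findPath [0] perm
    let total_time := addTime t path
    if total_time ≤ limit then
      some (PySem.List.sorted (perm.map (fun i => i - 1)) (fun x => x) false)
    else tryPermsA t limit rest

-- the outer 'for i in range(num_of_ids + 1, 0, -1)' loop; i is positive throughout,
-- so i.toNat is the Python value of the permutation length argument
def solGoA (t : List (List Int)) (limit n : Int) : List Int → List Int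
  | [] => []
  | i :: rest =>
    match tryPermsA t limit (PySem.List.permutations (PySem.List.pyRange 1 (n + 1) 1) i.toNat) with
    | some r => r
    | none => solGoA t limit n rest

def solution (time : List (List Int)) (time_limit : Int) : List Int :=
  let num_of_ids : Int := (time.length : Int) - 2
  if num_of_ids == 0 then []
  else
    let r := negativeCycle time
    if r.2 then PySem.List.pyRange 0 num_of_ids 1
    else solGoA r.1 time_limit num_of_ids (PySem.List.pyRange (num_of_ids + 1) 0 (-1))

-- ===== PORT B =====
-- Floyd–Warshall closure (the mutated matrix)
def fwClose (time : List (List Int)) (V : Int) : List (List Int) :=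
  (PySem.List.pyRange 0 V 1).foldl (fun m k =>
    (PySem.List.pyRange 0 V 1).foldl (fun m i =>
      (PySem.List.pyRange 0 V 1).foldl (fun m j =>
        let t := PySem.List.pyGetD (PySem.List.pyGetD m i []) k 0 +
                 PySem.List.pyGetD (PySem.List.pyGetD m k []) j 0
        if t < PySem.List.pyGetD (PySem.List.pyGetD m i []) j 0 then
          PySem.List.pySetD m i (PySem.List.pySetD (PySem.List.pyGetD m i []) j t)
        else m) m) m) time

-- backtracking DFS: first feasible permutation of `need` ids in lexicographic order,
-- accumulating the elapsed path time
def dfsB (t : List (List Int)) (limit : Int) (cur elapsed : Int)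
    (remaining : List Int) (need : Int) : Option (List Int) :=
  if need == 0 then
    if elapsed + PySem.List.pyGetD (PySem.List.pyGetD t cur []) (-1) 0 ≤ limit then
      some [] else none
  else
    (List.range remaining.length).attach.findSome? (fun idx =>
      let nxt := PySem.List.pyGetD remaining (idx.1 : Int) 0
      match dfsB t limit nxt
          (elapsed + PySem.List.pyGetD (PySem.List.pyGetD t cur []) nxt 0)
          (PySem.List.slice remaining none (some (idx.1 : Int)) ++
           PySem.List.slice remaining (some ((idx.1 : Int) + 1)) none)
          (need - 1) with
      | some res => some (nxt :: res)
      | none => none)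
termination_by remaining.length
decreasing_by
  have hm := idx.2
  simp only [List.mem_range] at hm
  rw [PySem.List.slice_to_natCast]
  have hc : ((idx.1 : Int) + 1) = ((idx.1 + 1 : Nat) : Int) := by push_cast; ring
  rw [hc, PySem.List.slice_from_natCast]
  simp only [List.length_append, List.length_take, List.length_drop]
  omega

-- the 'for size in range(n, 0, -1)' loop
def solGoB (t : List (List Int)) (limit n : Int) : List Int → List Int
  | [] => []
  | size :: rest =>
    match dfsB t limit 0 0 (PySem.List.pyRange 1 (n + 1) 1) size with
    | some res => PySem.List.sorted (res.map (fun x => x - 1)) (fun x => x) false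
    | none => solGoB t limit n rest

def solution_alt (time : List (List Int)) (time_limit : Int) : List Int :=
  let n : Int := (time.length : Int) - 2
  if n ≤ 0 then []
  else
    let V : Int := time.length
    let t := fwClose time V
    if (PySem.List.pyRange 0 V 1).any (fun i =>
        decide (PySem.List.pyGetD (PySem.List.pyGetD t i []) i 0 < 0)) then
      PySem.List.pyRange 0 n 1
    else solGoB t time_limit n (PySem.List.pyRange n 0 (-1))

-- ===== PRECONDITION & SPEC =====
-- Pre_ excludes exactly the inputs on which Python A raises IndexError: unless the
-- matrix has exactly 2 rows (then A returns [] before any indexing), every row must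
-- have at least len(time) entries, since negativeCycle reads times[i][k] for all
-- i, k < len(time).
def Pre_solution (time : List (List Int)) (time_limit : Int) : Prop :=
  time.length = 2 ∨ ∀ row ∈ time, time.length ≤ row.length
instance (time : List (List Int)) (time_limit : Int) : Decidable (Pre_solution time time_limit) := by
  unfold Pre_solution; infer_instance

def pvWitness_solution : List (List Int) × Int := ([[0, 1, 1], [1, 0, 1], [1, 1, 0]], 3)

def Spec_solution (time : List (List Int)) (time_limit : Int) (out : List Int) : Prop :=
  out = solution_alt time time_limit
instance (time : List (List Int)) (time_limit : Int) (out : List Int) : Decidable (Spec_solution time time_limit out) := by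
  unfold Spec_solution; infer_instance

-- ===== CLAIM (what is proved, stated in full; the proofs are below) =====
def Claim_equal_solution : Prop := ∀ (time : List (List Int)) (time_limit : Int), Dom_solution time time_limit → Pre_solution time time_limit → Spec_solution time time_limit (solution time time_limit)

-- ===== LEMMAS AND PROOFS =====

-- cost of the path cur :: p :: [-1] through matrix t
def costFrom (t : List (List Int)) (cur : Int) : List Int → Int
  | [] => PySem.List.pyGetD (PySem.List.pyGetD t cur []) (-1) 0
  | x :: p => PySem.List.pyGetD (PySem.List.pyGetD t cur []) x 0 + costFrom t x p

def pairSum (t : List (List Int)) : List Int → Int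
  | [] => 0
  | [_] => 0
  | a :: b :: r =>
    PySem.List.pyGetD (PySem.List.pyGetD t a []) b 0 + pairSum t (b :: r)

theorem addTimeGo_eq (t : List (List Int)) (p : List Int) (k : Nat) (tt : Int) :
    addTimeGo t p k tt = tt + pairSum t (p.drop k) := by
  fun_induction addTimeGo t p k tt with
  | case1 k tt h ih =>
    rw [ih]
    have hk1 : k + 1 < p.length := by omega
    have hk : k < p.length := by omega
    rw [List.drop_eq_getElem_cons hk, List.drop_eq_getElem_cons hk1]
    have e1 : PySem.List.pyGetD p (k : Int) 0 = p[k] := by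
      rw [PySem.List.pyGetD_natCast, List.getD_eq_getElem _ _ hk]
    have e2 : PySem.List.pyGetD p ((k : Int) + 1) 0 = p[k + 1] := by
      have : ((k : Int) + 1) = ((k + 1 : Nat) : Int) := by push_cast; ring
      rw [this, PySem.List.pyGetD_natCast, List.getD_eq_getElem _ _ hk1]
    rw [e1, e2]
    simp only [pairSum]
    rw [← List.drop_eq_getElem_cons hk1]
    ring
  | case2 k tt h =>
    have hlen : (p.drop k).length ≤ 1 := by simp; omega
    rcases hd : p.drop k with _ | ⟨a, _ | ⟨b, r⟩⟩
    · simp [pairSum]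
    · simp [pairSum]
    · rw [hd] at hlen; simp at hlen

theorem pairSum_path (t : List (List Int)) (perm : List Int) :
    ∀ c, pairSum t (c :: (perm ++ [-1])) = costFrom t c perm := by
  induction perm with
  | nil => intro c; simp [pairSum, costFrom]
  | cons x p ih => intro c; simp only [List.cons_append, pairSum, costFrom, ih x]

theorem addTime_findPath (t : List (List Int)) (perm : List Int) :
    addTime t (findPath [0] perm) = costFrom t 0 perm := by
  unfold addTime findPath
  rw [addTimeGo_eq]
  simp only [List.drop_zero, List.map_id_fun', id, zero_add, List.cons_append]
  exact pairSum_path t perm 0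

theorem tryPermsA_eq (t : List (List Int)) (limit : Int) (l : List (List Int)) :
    tryPermsA t limit l =
      (l.find? (fun p => decide (addTime t (findPath [0] p) ≤ limit))).map
        (fun p => PySem.List.sorted (p.map (fun i => i - 1)) (fun x => x) false) := by
  induction l with
  | nil => rfl
  | cons perm rest ih =>
    simp only [tryPermsA, List.find?_cons]
    by_cases hp : addTime t (findPath [0] perm) ≤ limit
    · simp [hp]
    · simp only [hp, decide_false, if_false, ih]

theorem find?_flatMap {α β : Type} (l : List α) (f : α → List β) (p : β → Bool) :
    (l.flatMap f).find? p = l.findSome? (fun a => (f a).find? p) := by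
  induction l with
  | nil => rfl
  | cons a l ih =>
    simp only [List.flatMap_cons, List.find?_append, List.findSome?_cons, ih]
    cases (f a).find? p <;> rfl

theorem findSome?_congr' {α β : Type} (l : List α) (f g : α → Option β)
    (h : ∀ a ∈ l, f a = g a) : l.findSome? f = l.findSome? g := by
  induction l with
  | nil => rfl
  | cons a l ih =>
    simp only [List.findSome?_cons, h a (by simp)]
    cases g a with
    | some b => rfl
    | none => exact ih (fun x hx => h x (by simp [hx]))

theorem perms_nil {α : Type} (r : Nat) (xs : List α) (h : xs.length < r) :
    PySem.List.permutations xs r = [] := by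
  induction r generalizing xs with
  | zero => omega
  | succ r ih =>
    simp only [PySem.List.permutations]
    rw [List.flatMap_eq_nil_iff]
    intro i hi
    simp only [List.mem_range] at hi
    rw [List.getElem?_eq_getElem hi]
    simp only
    rw [ih (xs.eraseIdx i) (by rw [List.length_eraseIdx_of_lt hi]; omega)]
    simp

theorem dfsB_eq (t : List (List Int)) (limit : Int) (m : Nat) :
    ∀ (rem : List Int) (cur elapsed : Int),
      dfsB t limit cur elapsed rem (m : Int) =
        (PySem.List.permutations rem m).find?
          (fun p => decide (elapsed + costFrom t cur p ≤ limit)) := by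
  induction m with
  | zero =>
    intro rem cur elapsed
    rw [dfsB]
    simp only [Nat.cast_zero, beq_self_eq_true, if_true]
    simp only [PySem.List.permutations, List.find?]
    by_cases h : elapsed + costFrom t cur [] ≤ limit
    · simp only [costFrom] at h; simp [h, costFrom]
    · simp only [costFrom] at h; simp [h, costFrom]
  | succ m ih =>
    intro rem cur elapsed
    rw [dfsB]
    have hne : (((m + 1 : Nat) : Int) == 0) = false := by
      simp only [beq_eq_false_iff_ne, ne_eq]
      push_cast
      omega
    rw [hne]
    simp only [Bool.false_eq_true, if_false]
    -- right side: permutations  →  flatMap, then find? over flatMap, then attach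
    simp only [PySem.List.permutations]
    rw [find?_flatMap]
    conv_rhs => rw [← List.attach_map_subtype_val (List.range rem.length),
      List.findSome?_map]
    apply findSome?_congr'
    intro idx _
    obtain ⟨i, hmem⟩ := idx
    have hi : i < rem.length := by simpa using hmem
    simp only [Function.comp]
    rw [List.getElem?_eq_getElem hi]
    simp only
    -- unfold the let for nxt and rewrite the slices to eraseIdx
    have enxt : PySem.List.pyGetD rem (i : Int) 0 = rem[i] := by
      rw [PySem.List.pyGetD_natCast, List.getD_eq_getElem _ _ hi]
    have eslice : PySem.List.slice rem none (some (i : Int)) ++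
        PySem.List.slice rem (some ((i : Int) + 1)) none = rem.eraseIdx i := by
      have hc : ((i : Int) + 1) = ((i + 1 : Nat) : Int) := by push_cast; ring
      rw [PySem.List.slice_to_natCast, hc, PySem.List.slice_from_natCast,
        List.eraseIdx_eq_take_drop_succ]
    have harg : ((m + 1 : Nat) : Int) - 1 = ((m : Nat) : Int) := by push_cast; ring
    rw [enxt, eslice, harg, ih]
    rw [List.find?_map]
    have hpred : ((fun p => decide (elapsed + costFrom t cur p ≤ limit)) ∘
        (fun p => rem[i] :: p)) = (fun p =>
          decide (elapsed + PySem.List.pyGetD (PySem.List.pyGetD t cur []) rem[i] 0 +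
            costFrom t rem[i] p ≤ limit)) := by
      funext p
      simp only [Function.comp, costFrom]
      rw [decide_eq_decide]
      omega
    rw [hpred]
    cases List.find? (fun p =>
        decide (elapsed + PySem.List.pyGetD (PySem.List.pyGetD t cur []) rem[i] 0 +
          costFrom t rem[i] p ≤ limit)) (PySem.List.permutations (rem.eraseIdx i) m) with
    | none => rfl
    | some res => rfl

theorem solGo_eq (t : List (List Int)) (limit n : Int) (l : List Int)
    (h : ∀ i ∈ l, 0 < i) : solGoA t limit n l = solGoB t limit n l := by
  induction l with
  | nil => rfl
  | cons i rest ih =>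
    have hi : 0 < i := h i (by simp)
    have hcast : i = ((i.toNat : Nat) : Int) := by omega
    simp only [solGoA, solGoB]
    rw [tryPermsA_eq]
    have hpred : (fun p => decide (addTime t (findPath [0] p) ≤ limit)) =
        (fun p => decide (0 + costFrom t 0 p ≤ limit)) := by
      funext p
      rw [decide_eq_decide, addTime_findPath]
      omega
    rw [hpred]
    conv_rhs => rw [hcast]
    rw [dfsB_eq]
    cases List.find? (fun p => decide (0 + costFrom t 0 p ≤ limit))
        (PySem.List.permutations (PySem.List.pyRange 1 (n + 1) 1) i.toNat) with
    | none => exact ih (fun j hj => h j (by simp [hj]))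
    | some res => rfl

theorem fw_eq (times : List (List Int)) :
    negativeCycle times = (fwClose times times.length,
      (PySem.List.pyRange 0 (times.length : Int) 1).any (fun i =>
        decide (PySem.List.pyGetD (PySem.List.pyGetD (fwClose times times.length) i []) i 0 < 0))) := by
  rfl

-- ===== VERDICT (by name: the statement is the Claim_ definition above) =====
theorem solution_spec : Claim_equal_solution := by
  intro time time_limit _hdom _hpre
  unfold Spec_solution
  by_cases h2 : time.length = 2
  · simp [solution, solution_alt, h2]
  · have hg : (((time.length : Int) - 2) == 0) = false := by
      simp only [beq_eq_false_iff_ne, ne_eq]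
      omega
    simp only [solution, solution_alt, hg, Bool.false_eq_true, if_false, fw_eq]
    rcases lt_or_ge time.length 2 with hlt | hge
    · -- 0 or 1 rows: A returns [] through either branch, B returns [] at once
      rw [if_pos (show (time.length : Int) - 2 ≤ 0 by omega)]
      split
      · exact PySem.List.pyRange_one_eq_nil (by omega)
      · rw [PySem.List.pyRange_neg_one_eq_nil (by omega)]
        rfl
    · -- at least 3 rows: the main case
      have h3 : 3 ≤ time.length := by omega
      rw [if_neg (show ¬((time.length : Int) - 2 ≤ 0) by omega)]
      split
      · rfl
      · rw [PySem.List.pyRange_neg_one_cons (show (0:Int) < (time.length : Int) - 2 + 1 by omega)]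
        simp only [solGoA]
        rw [perms_nil (((time.length : Int) - 2 + 1).toNat) _
          (by rw [PySem.List.length_pyRange_one]; omega)]
        simp only [tryPermsA]
        have hn1 : (time.length : Int) - 2 + 1 - 1 = (time.length : Int) - 2 := by ring
        rw [hn1]
        exact solGo_eq _ _ _ _ (fun i hi => (PySem.List.mem_pyRange_neg_one.1 hi).1)
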